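-- pv_equiv track=rewrite | github.com/minhson3012/adventofcode2024 | day15/day15.py | can_move_box
-- ===== SOURCE A (Python) =====
-- def can_move_box(walls, boxes, next_point, current_index):
--     # Check if wall is next
--     if(next_point in walls or (next_point[0], next_point[1] + 1) in walls):
--         return False
--
--     # Check if box can be moved
--
--     for index, box in enumerate(boxes):
--         boxes_to_check = [box, (box[0], box[1] + 1)]
--         if((next_point in boxes_to_check or (next_point[0], next_point[1] + 1) == box) and current_index != index):
--             return False
--     return True
-- ===== SOURCE B (Python) =====
-- def can_move_box(walls, boxes, next_point, current_index):
--     r, c = next_point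
--     # Wall checks (unchanged)
--     if (r, c) in walls or (r, c + 1) in walls:
--         return False
--     # A box at cell x blocks iff x is one of these three cells; instead of testing
--     # each box against next_point, count occupants of the three cells and discount
--     # the box being moved itself.
--     for cell in ((r, c), (r, c - 1), (r, c + 1)):
--         cnt = boxes.count(cell)
--         if 0 <= current_index < len(boxes) and boxes[current_index] == cell:
--             cnt -= 1
--         if cnt > 0:
--             return False
--     return True
-- ===== Notes on version B (the rewrite author's own statement) =====
-- stated objective: alternative
-- what changed: Instead of scanning boxes and testing each box (and its right half) against next_point, B inverts the test: it computes the three cells a blocking box could occupy and, for each, counts its occurrences in boxes, discounting one occurrence at current_index.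
import Mathlib
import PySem

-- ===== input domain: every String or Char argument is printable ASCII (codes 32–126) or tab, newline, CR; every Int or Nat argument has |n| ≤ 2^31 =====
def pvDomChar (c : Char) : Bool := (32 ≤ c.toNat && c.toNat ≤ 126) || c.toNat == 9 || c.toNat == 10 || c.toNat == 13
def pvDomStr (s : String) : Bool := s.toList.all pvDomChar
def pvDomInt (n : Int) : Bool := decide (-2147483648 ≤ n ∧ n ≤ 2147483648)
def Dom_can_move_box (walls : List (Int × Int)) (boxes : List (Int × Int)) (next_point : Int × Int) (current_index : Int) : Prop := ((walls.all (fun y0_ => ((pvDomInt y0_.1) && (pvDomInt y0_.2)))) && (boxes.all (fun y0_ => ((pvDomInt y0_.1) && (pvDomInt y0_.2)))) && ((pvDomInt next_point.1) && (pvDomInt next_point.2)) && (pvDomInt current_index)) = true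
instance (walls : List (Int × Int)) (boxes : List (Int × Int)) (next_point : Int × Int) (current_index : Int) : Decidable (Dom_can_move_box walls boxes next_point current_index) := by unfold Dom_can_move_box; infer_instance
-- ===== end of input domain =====

-- B replaces A's per-box comparison scan by counting, for each of the three cells a
-- blocking box could occupy, its occurrences in boxes (discounting current_index);
-- objective: alternative (same cost, inverted test).

-- ===== PORT A =====
-- A's 'for index, box in enumerate(boxes)' loop; idx is the running enumeration index
def canMoveBoxLoopA (np : Int × Int) (ci : Int) : Int → List (Int × Int) → Bool
  | _, [] => true
  | idx, box :: rest =>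
    let boxes_to_check := [box, (box.1, box.2 + 1)]
    if (boxes_to_check.contains np || ((np.1, np.2 + 1) == box)) && (ci != idx) then
      false
    else
      canMoveBoxLoopA np ci (idx + 1) rest

def can_move_box (walls : List (Int × Int)) (boxes : List (Int × Int)) (next_point : Int × Int) (current_index : Int) : Bool :=
  if walls.contains next_point || walls.contains (next_point.1, next_point.2 + 1) then
    false
  else
    canMoveBoxLoopA next_point current_index 0 boxes

-- ===== PORT B =====
-- 'cnt = boxes.count(cell); if 0 <= current_index < len(boxes) and boxes[current_index] == cell: cnt -= 1; cnt > 0'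
def altCellBlocked (boxes : List (Int × Int)) (ci : Int) (cell : Int × Int) : Bool :=
  let cnt : Int := (PySem.List.count boxes cell : Int)
  let cnt := if 0 ≤ ci ∧ ci < (boxes.length : Int) ∧ PySem.List.pyGet? boxes ci = some cell then cnt - 1 else cnt
  decide (0 < cnt)

-- 'for cell in (...): if <blocked>: return False'
def altCellLoop (boxes : List (Int × Int)) (ci : Int) : List (Int × Int) → Bool
  | [] => true
  | cell :: rest => if altCellBlocked boxes ci cell then false else altCellLoop boxes ci rest

def can_move_box_alt (walls : List (Int × Int)) (boxes : List (Int × Int)) (next_point : Int × Int) (current_index : Int) : Bool :=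
  let r := next_point.1
  let c := next_point.2
  if walls.contains (r, c) || walls.contains (r, c + 1) then
    false
  else
    altCellLoop boxes current_index [(r, c), (r, c - 1), (r, c + 1)]

-- ===== PRECONDITION & SPEC =====
def Spec_can_move_box (walls : List (Int × Int)) (boxes : List (Int × Int)) (next_point : Int × Int) (current_index : Int) (out : Bool) : Prop := out = can_move_box_alt walls boxes next_point current_index
instance (walls : List (Int × Int)) (boxes : List (Int × Int)) (next_point : Int × Int) (current_index : Int) (out : Bool) : Decidable (Spec_can_move_box walls boxes next_point current_index out) := by unfold Spec_can_move_box; infer_instance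

-- ===== CLAIM (what is proved, stated in full; the proofs are below) =====
def Claim_equal_can_move_box : Prop := ∀ (walls : List (Int × Int)) (boxes : List (Int × Int)) (next_point : Int × Int) (current_index : Int), Dom_can_move_box walls boxes next_point current_index → Spec_can_move_box walls boxes next_point current_index (can_move_box walls boxes next_point current_index)

-- ===== LEMMAS AND PROOFS =====

-- a box blocks np iff it lies in one of the three candidate cells
def Hits (np box : Int × Int) : Prop :=
  box = np ∨ box = (np.1, np.2 - 1) ∨ box = (np.1, np.2 + 1)

lemma hits_iff (np box : Int × Int) :
    (([box, (box.1, box.2 + 1)].contains np || ((np.1, np.2 + 1) == box)) = true) ↔ Hits np box := by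
  simp [Hits, Prod.ext_iff]
  omega

-- characterization of A's enumerate loop
lemma loopA_false_iff (np : Int × Int) (ci : Int) :
    ∀ (bs : List (Int × Int)) (idx : Int),
      canMoveBoxLoopA np ci idx bs = false ↔
        ∃ i, ∃ _ : i < bs.length, Hits np bs[i] ∧ idx + (i : Int) ≠ ci := by
  intro bs
  induction bs with
  | nil => intro idx; simp [canMoveBoxLoopA]
  | cons box rest ih =>
    intro idx
    simp only [canMoveBoxLoopA]
    by_cases hcond : (([box, (box.1, box.2 + 1)].contains np || ((np.1, np.2 + 1) == box)) = true) ∧ ci ≠ idx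
    · rw [if_pos (by rw [hcond.1, Bool.true_and, bne_iff_ne]; exact hcond.2)]
      constructor
      · intro _
        exact ⟨0, by simp, (hits_iff np box).1 hcond.1, by simpa using (Ne.symm hcond.2)⟩
      · intro _; rfl
    · rw [if_neg (by
        intro h
        simp only [Bool.and_eq_true, bne_iff_ne] at h
        exact hcond ⟨h.1, h.2⟩)]
      rw [ih (idx + 1)]
      constructor
      · rintro ⟨i, hi, hh, hne⟩
        exact ⟨i + 1, by simpa using Nat.succ_lt_succ hi, by simpa using hh, by push_cast at hne ⊢ <;> omega⟩
      · rintro ⟨i, hi, hh, hne⟩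
        cases i with
        | zero =>
          exfalso
          exact hcond ⟨(hits_iff np box).2 (by simpa using hh), by simpa using (Ne.symm hne)⟩
        | succ j =>
          exact ⟨j, by simpa using Nat.lt_of_succ_lt_succ hi, by simpa using hh, by push_cast at hne ⊢ <;> omega⟩

-- duplicate counting: with a known occurrence at k, count ≥ 2 iff another index holds cell
lemma count_two_iff :
    ∀ (bs : List (Int × Int)) (k : ℕ) (_ : k < bs.length) (cell : Int × Int), bs[k] = cell →
      (2 ≤ bs.count cell ↔ ∃ i, ∃ _ : i < bs.length, bs[i] = cell ∧ i ≠ k) := by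
  intro bs
  induction bs with
  | nil => intro k hk; simp at hk
  | cons b rest ih =>
    intro k hk cell hcell
    cases k with
    | zero =>
      simp only [List.getElem_cons_zero] at hcell
      subst hcell
      rw [List.count_cons_self]
      constructor
      · intro h
        have : 0 < rest.count b := by omega
        rcases List.getElem_of_mem (List.count_pos_iff.1 this) with ⟨j, hj, hje⟩
        exact ⟨j + 1, by simpa using Nat.succ_lt_succ hj, by simpa using hje, by omega⟩
      · rintro ⟨i, hi, hie, hne⟩
        cases i with
        | zero => omega
        | succ j =>
          have hj : j < rest.length := by simpa using Nat.lt_of_succ_lt_succ hi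
          have : rest[j] = b := by simpa using hie
          have : 0 < rest.count b := List.count_pos_iff.2 (this ▸ List.getElem_mem hj)
          omega
    | succ k' =>
      have hk' : k' < rest.length := by simpa using Nat.lt_of_succ_lt_succ hk
      have hcell' : rest[k'] = cell := by simpa using hcell
      have hmem : 0 < rest.count cell := List.count_pos_iff.2 (hcell' ▸ List.getElem_mem hk')
      by_cases hb : b = cell
      · subst hb
        rw [List.count_cons_self]
        constructor
        · intro _
          exact ⟨0, by simp, by simp, by omega⟩
        · intro _; omega
      · rw [List.count_cons_of_ne (by simpa [eq_comm] using hb)]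
        rw [ih k' hk' cell hcell']
        constructor
        · rintro ⟨j, hj, hje, hne⟩
          exact ⟨j + 1, by simpa using Nat.succ_lt_succ hj, by simpa using hje, by omega⟩
        · rintro ⟨i, hi, hie, hne⟩
          cases i with
          | zero => exact absurd (by simpa using hie) hb
          | succ j =>
            exact ⟨j, by simpa using Nat.lt_of_succ_lt_succ hi, by simpa using hie, by omega⟩

-- characterization of B's per-cell test
lemma altCellBlocked_iff (boxes : List (Int × Int)) (ci : Int) (cell : Int × Int) :
    altCellBlocked boxes ci cell = true ↔
      ∃ i, ∃ _ : i < boxes.length, boxes[i] = cell ∧ (i : Int) ≠ ci := by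
  rw [show altCellBlocked boxes ci cell = decide (0 < (if 0 ≤ ci ∧ ci < (boxes.length : Int) ∧ PySem.List.pyGet? boxes ci = some cell then ((List.count cell boxes : Int)) - 1 else ((List.count cell boxes : Int)))) from rfl]
  by_cases hg : 0 ≤ ci ∧ ci < (boxes.length : Int) ∧ PySem.List.pyGet? boxes ci = some cell
  · rw [if_pos hg]
    obtain ⟨h0, hlt, hget⟩ := hg
    have hkk : ci.toNat < boxes.length := by omega
    have hgete : boxes[ci.toNat] = cell := by
      rw [PySem.List.pyGet?_eq_some_getElem boxes h0 hlt] at hget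
      simpa using hget
    rw [show (decide (0 < (boxes.count cell : Int) - 1)) = decide (2 ≤ boxes.count cell) by
      simp only [decide_eq_decide]; omega]
    rw [decide_eq_true_iff]
    rw [count_two_iff boxes ci.toNat hkk cell hgete]
    constructor
    · rintro ⟨i, hi, hie, hne⟩
      exact ⟨i, hi, hie, by omega⟩
    · rintro ⟨i, hi, hie, hne⟩
      exact ⟨i, hi, hie, by omega⟩
  · rw [if_neg hg]
    rw [show (decide (0 < (boxes.count cell : Int))) = decide (cell ∈ boxes) by
      simp only [decide_eq_decide]
      rw [← List.count_pos_iff (a := cell) (l := boxes)]; omega]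
    rw [decide_eq_true_iff]
    constructor
    · intro hmem
      rcases List.getElem_of_mem hmem with ⟨i, hi, hie⟩
      refine ⟨i, hi, hie, ?_⟩
      intro heq
      apply hg
      refine ⟨by omega, by omega, ?_⟩
      rw [← heq, PySem.List.pyGet?_natCast]
      simp [hi, hie]
    · rintro ⟨i, hi, hie, _⟩
      exact hie ▸ List.getElem_mem hi
  
-- B's loop over the candidate cells
lemma altCellLoop_false_iff (boxes : List (Int × Int)) (ci : Int) :
    ∀ cells : List (Int × Int),
      altCellLoop boxes ci cells = false ↔ ∃ cell ∈ cells, altCellBlocked boxes ci cell = true := by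
  intro cells
  induction cells with
  | nil => simp [altCellLoop]
  | cons cell rest ih =>
    simp only [altCellLoop]
    by_cases h : altCellBlocked boxes ci cell = true
    · simp [h]
    · simp only [Bool.not_eq_true] at h
      simp [h, ih]

lemma loops_agree (boxes : List (Int × Int)) (np : Int × Int) (ci : Int) :
    canMoveBoxLoopA np ci 0 boxes = altCellLoop boxes ci [(np.1, np.2), (np.1, np.2 - 1), (np.1, np.2 + 1)] := by
  have hA := loopA_false_iff np ci boxes 0
  have hB := altCellLoop_false_iff boxes ci [(np.1, np.2), (np.1, np.2 - 1), (np.1, np.2 + 1)]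
  have key : canMoveBoxLoopA np ci 0 boxes = false ↔
      altCellLoop boxes ci [(np.1, np.2), (np.1, np.2 - 1), (np.1, np.2 + 1)] = false := by
    rw [hA, hB]
    constructor
    · rintro ⟨i, hi, hh, hne⟩
      refine ⟨boxes[i], ?_, (altCellBlocked_iff boxes ci boxes[i]).2 ⟨i, hi, rfl, by simpa using hne⟩⟩
      rcases hh with h | h | h <;> simp [h]
    · rintro ⟨cell, hmem, hb⟩
      rcases (altCellBlocked_iff boxes ci cell).1 hb with ⟨i, hi, hie, hne⟩
      refine ⟨i, hi, ?_, by simpa using hne⟩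
      simp only [List.mem_cons, List.not_mem_nil, or_false] at hmem
      unfold Hits
      rcases hmem with h | h | h <;> rw [hie, h] <;> simp
  cases hA' : canMoveBoxLoopA np ci 0 boxes <;> cases hB' : altCellLoop boxes ci [(np.1, np.2), (np.1, np.2 - 1), (np.1, np.2 + 1)] <;>
    simp_all

-- ===== VERDICT (by name: the statement is the Claim_ definition above) =====
theorem can_move_box_spec : Claim_equal_can_move_box := by
  intro walls boxes np ci _
  unfold Spec_can_move_box can_move_box can_move_box_alt
  by_cases hw : (walls.contains np || walls.contains (np.1, np.2 + 1)) = true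
  · simp only at hw ⊢
    rw [if_pos hw, if_pos (by simpa using hw)]
  · simp only at hw ⊢
    rw [if_neg hw, if_neg (by simpa using hw)]
    exact loops_agree boxes np ci
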